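-- pv_equiv track=rewrite | github.com/pypi-data/pypi-mirror-400 | packages/code-periscope/code_periscope-0.1.0-py3-none-any.whl/code_periscope/core/signals.py | humanize_signals
-- ===== SOURCE A (Python) =====
-- from typing import Dict, Iterable, List
--
-- _SIGNAL_TOKEN_MAP: Dict[str, str] = {
--     # Cluster label feature names
--     "churn": "code churn (lines changed)",
--     "commits": "commit count",
--     "contributors": "number of contributors",
--     "files_touched": "files touched",
--     "fix_ratio": "fix-heavy changes",
--
--     # Special labels
--     "singleton": "small / one-off area",
--     "balanced": "balanced activity",
--
--     # Overlay tags (already close to readable, but we can polish)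
--     "high coupling": "high coupling (wide blast radius)",
--     "high ownership concentration": "high ownership concentration (bus factor risk)",
--     "ownership churn": "ownership churn (handoffs / new owners)",
--     "elevated reverts": "elevated revert rate (instability)",
--     "fix-follow hotspot": "fix-follow hotspot (fixes quickly follow changes)",
-- }
--
-- def humanize_signals(signals: Iterable[str]) -> List[str]:
--     """Convert internal signal phrases into more human-readable ones.
--
--     This is primarily used for what we currently store in `ReportModel.classifier`.
--     """
--
--     out: List[str] = []
--     for s in signals or []:
--         raw = str(s or "").strip()
--         if not raw:
--             continue
--
--         # Cluster labels often arrive as a single comma-separated phrase.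
--         # Example: "very high commits, very high files_touched".
--         if "," in raw:
--             expanded: List[str] = []
--             for part in [p.strip() for p in raw.split(",") if p.strip()]:
--                 expanded.extend(humanize_signals([part]))
--             for e in expanded:
--                 if e not in out:
--                     out.append(e)
--             continue
--
--         # Direct match first.
--         if raw in _SIGNAL_TOKEN_MAP:
--             out.append(_SIGNAL_TOKEN_MAP[raw])
--             continue
--
--         # Cluster labels are often of the form: "very high churn".
--         parts = raw.split(" ", 2)
--         if len(parts) >= 2 and parts[-1] in _SIGNAL_TOKEN_MAP:
--             # Handles: "high coupling" too, but those are already direct matched above.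
--             pass
--
--         if raw.startswith("very high "):
--             feat = raw[len("very high ") :].strip()
--             repl = _SIGNAL_TOKEN_MAP.get(feat)
--             out.append(f"very high {repl}" if repl else raw)
--             continue
--         if raw.startswith("high "):
--             feat = raw[len("high ") :].strip()
--             repl = _SIGNAL_TOKEN_MAP.get(feat)
--             out.append(f"high {repl}" if repl else raw)
--             continue
--         if raw.startswith("very low "):
--             feat = raw[len("very low ") :].strip()
--             repl = _SIGNAL_TOKEN_MAP.get(feat)
--             out.append(f"very low {repl}" if repl else raw)
--             continue
--         if raw.startswith("low "):
--             feat = raw[len("low ") :].strip()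
--             repl = _SIGNAL_TOKEN_MAP.get(feat)
--             out.append(f"low {repl}" if repl else raw)
--             continue
--
--         out.append(raw)
--
--     # de-dupe while preserving order
--     seen = set()
--     deduped: List[str] = []
--     for s in out:
--         if s in seen:
--             continue
--         seen.add(s)
--         deduped.append(s)
--     return deduped
-- ===== SOURCE B (Python) =====
-- from typing import Dict, Iterable, List
--
-- _SIGNAL_TOKEN_MAP: Dict[str, str] = {
--     "churn": "code churn (lines changed)",
--     "commits": "commit count",
--     "contributors": "number of contributors",
--     "files_touched": "files touched",
--     "fix_ratio": "fix-heavy changes",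
--     "singleton": "small / one-off area",
--     "balanced": "balanced activity",
--     "high coupling": "high coupling (wide blast radius)",
--     "high ownership concentration": "high ownership concentration (bus factor risk)",
--     "ownership churn": "ownership churn (handoffs / new owners)",
--     "elevated reverts": "elevated revert rate (instability)",
--     "fix-follow hotspot": "fix-follow hotspot (fixes quickly follow changes)",
-- }
--
-- _PREFIXES = ("very high ", "high ", "very low ", "low ")
--
--
-- def _translate(token: str) -> str:
--     direct = _SIGNAL_TOKEN_MAP.get(token)
--     if direct is not None:
--         return direct
--     for prefix in _PREFIXES:
--         if token.startswith(prefix):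
--             repl = _SIGNAL_TOKEN_MAP.get(token[len(prefix):].strip())
--             return f"{prefix}{repl}" if repl else token
--     return token
--
--
-- def humanize_signals(signals: Iterable[str]) -> List[str]:
--     # Phase 1: flatten into single tokens (comma-separated entries split up).
--     tokens: List[str] = []
--     for s in (signals or []):
--         raw = str(s or "").strip()
--         if not raw:
--             continue
--         if "," in raw:
--             tokens.extend(p.strip() for p in raw.split(",") if p.strip())
--         else:
--             tokens.append(raw)
--     # Phase 2+3: translate each token and de-dupe preserving first occurrence.
--     seen = set()
--     result: List[str] = []
--     for t in tokens:
--         h = _translate(t)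
--         if h not in seen:
--             seen.add(h)
--             result.append(h)
--     return result
-- ===== Notes on version B (the rewrite author's own statement) =====
-- stated objective: simpler
-- what changed: Replaces A's self-recursive loop with interleaved dedup and its repeated prefix if-chains by three flat phases: flatten comma-entries into tokens (no recursion), translate each token via a map lookup falling back to an ordered prefix table, and one seen-set dedup pass; A's dead split(' ',2) block is dropped.
import Mathlib
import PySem

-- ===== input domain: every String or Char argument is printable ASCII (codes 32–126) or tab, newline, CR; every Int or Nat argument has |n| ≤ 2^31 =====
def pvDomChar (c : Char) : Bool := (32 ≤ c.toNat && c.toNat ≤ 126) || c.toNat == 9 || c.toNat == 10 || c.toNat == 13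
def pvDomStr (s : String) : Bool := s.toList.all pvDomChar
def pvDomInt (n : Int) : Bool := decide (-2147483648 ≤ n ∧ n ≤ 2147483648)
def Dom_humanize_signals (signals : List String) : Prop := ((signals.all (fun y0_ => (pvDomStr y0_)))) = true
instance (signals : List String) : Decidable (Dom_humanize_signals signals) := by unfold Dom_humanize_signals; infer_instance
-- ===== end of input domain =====

-- B replaces A's self-recursive loop with interleaved dedup by three flat phases
-- (flatten comma entries, translate each token via map + ordered prefix table, dedup once);
-- same outputs, no speed claim.

-- _SIGNAL_TOKEN_MAP (shared by both Pythons as a module constant)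
def sigMap : PySem.Dict String String := PySem.Dict.ofList [
  ("churn", "code churn (lines changed)"),
  ("commits", "commit count"),
  ("contributors", "number of contributors"),
  ("files_touched", "files touched"),
  ("fix_ratio", "fix-heavy changes"),
  ("singleton", "small / one-off area"),
  ("balanced", "balanced activity"),
  ("high coupling", "high coupling (wide blast radius)"),
  ("high ownership concentration", "high ownership concentration (bus factor risk)"),
  ("ownership churn", "ownership churn (handoffs / new owners)"),
  ("elevated reverts", "elevated revert rate (instability)"),
  ("fix-follow hotspot", "fix-follow hotspot (fixes quickly follow changes)")]

-- ===== PORT A =====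
-- [p.strip() for p in raw.split(",") if p.strip()]  (filter-then-strip = strip-then-filter, strip is idempotent)
def hsParts (raw : String) : List String :=
  (((PySem.Str.split? raw ",").getD []).map PySem.Str.strip).filter (fun p => !(p == ""))

-- the `if e not in out: out.append(e)` step of A's comma branch
def hsIns (o : List String) (e : String) : List String := if o.contains e then o else o ++ [e]

-- A's trailing seen-set de-dupe loop
def hsDedupA (out : List String) : List String :=
  (out.foldl (fun acc s =>
      if PySem.Set.contains acc.2 s then acc else (acc.1 ++ [s], PySem.Set.add acc.2 s))
    (([], PySem.Set.empty) : List String × PySem.Set String)).1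

-- A's per-token tail: direct match, the dead `raw.split(" ", 2)` block, then the four prefix branches
def hsTokenA (out : List String) (raw : String) : List String :=
  if sigMap.contains raw then out ++ [sigMap.getD raw ""]
  else
    -- dead code in A: `parts = raw.split(" ", 2)` is computed, tested, and the branch body is `pass`
    let _parts := (PySem.Str.splitMax? raw " " 2).getD []
    if PySem.Str.startswith raw "very high " then
      let feat := PySem.Str.strip (PySem.Str.slice raw (some 10) none)
      let repl := sigMap.get? feat
      if repl.getD "" ≠ "" then out ++ ["very high " ++ repl.getD ""] else out ++ [raw]
    else if PySem.Str.startswith raw "high " then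
      let feat := PySem.Str.strip (PySem.Str.slice raw (some 5) none)
      let repl := sigMap.get? feat
      if repl.getD "" ≠ "" then out ++ ["high " ++ repl.getD ""] else out ++ [raw]
    else if PySem.Str.startswith raw "very low " then
      let feat := PySem.Str.strip (PySem.Str.slice raw (some 9) none)
      let repl := sigMap.get? feat
      if repl.getD "" ≠ "" then out ++ ["very low " ++ repl.getD ""] else out ++ [raw]
    else if PySem.Str.startswith raw "low " then
      let feat := PySem.Str.strip (PySem.Str.slice raw (some 4) none)
      let repl := sigMap.get? feat
      if repl.getD "" ≠ "" then out ++ ["low " ++ repl.getD ""] else out ++ [raw]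
    else out ++ [raw]

-- A, with a fuel argument that only makes its self-recursion structural: A recurses on the
-- comma-split parts, which contain no comma (splitOn_no_comma below), so its depth is ≤ 2.
def humanizeA : Nat → List String → List String
  | 0, _ => []
  | fuel+1, signals =>
    let out := signals.foldl (fun out s =>
      let raw := PySem.Str.strip (if s == "" then "" else s)   -- str(s or "").strip()
      if raw == "" then out
      else if PySem.Str.isIn "," raw then
        let expanded := (hsParts raw).foldl (fun e p => e ++ humanizeA fuel [p]) []
        expanded.foldl hsIns out
      else hsTokenA out raw) []
    hsDedupA out

def humanize_signals (signals : List String) : List String := humanizeA 2 signals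

-- ===== PORT B =====
def hsPrefixes : List String := ["very high ", "high ", "very low ", "low "]

def hsPrefixLoop : List String → String → String
  | [], tok => tok
  | pre :: rest, tok =>
    if PySem.Str.startswith tok pre then
      let repl := sigMap.get? (PySem.Str.strip (PySem.Str.slice tok (some (PySem.Str.len pre)) none))
      if repl.getD "" ≠ "" then pre ++ repl.getD "" else tok
    else hsPrefixLoop rest tok

def hsTranslate (tok : String) : String :=
  match sigMap.get? tok with
  | some v => v
  | none => hsPrefixLoop hsPrefixes tok

def humanize_signals_alt (signals : List String) : List String :=
  -- Phase 1: flatten into single tokens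
  let tokens := signals.foldl (fun tokens s =>
      let raw := PySem.Str.strip (if s == "" then "" else s)
      if raw == "" then tokens
      else if PySem.Str.isIn "," raw then
        tokens ++ (((PySem.Str.split? raw ",").getD []).map PySem.Str.strip).filter (fun p => !(p == ""))
      else tokens ++ [raw]) []
  -- Phase 2+3: translate and de-dupe preserving first occurrence
  (tokens.foldl (fun acc t =>
      let h := hsTranslate t
      if PySem.Set.contains acc.2 h then acc else (acc.1 ++ [h], PySem.Set.add acc.2 h))
    (([], PySem.Set.empty) : List String × PySem.Set String)).1

-- ===== PRECONDITION & SPEC =====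
def Spec_humanize_signals (signals : List String) (out : List String) : Prop := out = humanize_signals_alt signals
instance (signals : List String) (out : List String) : Decidable (Spec_humanize_signals signals out) := by unfold Spec_humanize_signals; infer_instance

-- ===== CLAIM (what is proved, stated in full; the proofs are below) =====
def Claim_equal_humanize_signals : Prop := ∀ (signals : List String), Dom_humanize_signals signals → Spec_humanize_signals signals (humanize_signals signals)

-- ===== LEMMAS AND PROOFS =====

-- strip facts
theorem hs_dw_prefix {α : Type} {p : α → Bool} {l m : List α} (hp : l <+: m)
    (hm : List.dropWhile p m = m) : List.dropWhile p l = l := by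
  cases l with
  | nil => simp
  | cons a t =>
    obtain ⟨r, hr⟩ := hp
    rw [← hr, List.cons_append, List.dropWhile_cons] at hm
    by_cases hpa : p a
    · rw [if_pos hpa] at hm
      have := List.length_dropWhile_le p (t ++ r)
      rw [hm] at this
      simp at this
    · simp [hpa]

theorem hs_strip_idem (cs : List Char) : PySem.Chars.strip (PySem.Chars.strip cs) = PySem.Chars.strip cs := by
  unfold PySem.Chars.strip PySem.Chars.rstrip PySem.Chars.lstrip
  simp only [List.reverse_inj]
  have hA : List.dropWhile PySem.Chars.isspace (List.dropWhile PySem.Chars.isspace cs) = List.dropWhile PySem.Chars.isspace cs :=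
    List.dropWhile_idempotent _ _
  set A := List.dropWhile PySem.Chars.isspace cs with hAdef
  set B := List.dropWhile PySem.Chars.isspace A.reverse with hBdef
  have hBs : B <:+ A.reverse := List.dropWhile_suffix _
  have hBr : B.reverse <+: A := by
    rw [← List.reverse_reverse A]
    exact List.reverse_prefix.mpr (by simpa using hBs)
  have h1 : List.dropWhile PySem.Chars.isspace B.reverse = B.reverse := hs_dw_prefix hBr hA
  rw [h1, List.reverse_reverse, hBdef, List.dropWhile_idempotent]

theorem hs_mem_strip {x : Char} {cs : List Char} (h : x ∈ PySem.Chars.strip cs) : x ∈ cs := by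
  unfold PySem.Chars.strip PySem.Chars.rstrip PySem.Chars.lstrip at h
  have h1 := (List.dropWhile_sublist (l := ((cs.dropWhile PySem.Chars.isspace).reverse)) PySem.Chars.isspace).mem (by simpa using h)
  exact (List.dropWhile_sublist _).mem (by simpa using h1)

-- split pieces contain no separator character
theorem hs_go_no_sep (c : Char) : ∀ (fuel : Nat) (l cur : List Char) (acc : List (List Char)),
    l.length < fuel → c ∉ cur → (∀ a ∈ acc, c ∉ a) →
    ∀ p ∈ PySem.Chars.splitOn.go [c] fuel l cur acc, c ∉ p := by
  intro fuel
  induction fuel with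
  | zero => intro l cur acc h; omega
  | succ n ih =>
    intro l cur acc hlen hcur hacc p hp
    match l with
    | [] =>
      simp only [PySem.Chars.splitOn.go, List.mem_reverse, List.mem_cons] at hp
      rcases hp with h | h
      · subst h; simpa using hcur
      · exact hacc _ h
    | d :: rest =>
      rw [PySem.Chars.splitOn.go] at hp
      by_cases hpre : [c].isPrefixOf (d :: rest) = true
      · rw [if_pos hpre] at hp
        refine ih _ [] _ ?_ (by simp) ?_ p hp
        · simp at hlen ⊢; omega
        · intro a ha
          simp only [List.mem_cons] at ha
          rcases ha with h | h
          · subst h; simpa using hcur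
          · exact hacc _ h
      · rw [if_neg hpre] at hp
        have hd : ¬ c = d := by simpa [List.isPrefixOf] using hpre
        refine ih rest (d :: cur) acc (by simp at hlen ⊢; omega) ?_ hacc p hp
        simp only [List.mem_cons, not_or]
        exact ⟨hd, hcur⟩

theorem splitOn_no_comma (cs : List Char) (c : Char) :
    ∀ p ∈ PySem.Chars.splitOn cs [c], c ∉ p := by
  unfold PySem.Chars.splitOn
  exact hs_go_no_sep c (cs.length + 1) cs [] [] (by omega) (by simp) (by simp)

-- every p in hsParts raw is nonempty, stripped, and comma-free
theorem hsParts_facts (raw : String) :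
    ∀ p ∈ hsParts raw, p ≠ "" ∧ PySem.Str.strip p = p ∧ PySem.Str.isIn "," p = false := by
  intro p hp
  unfold hsParts at hp
  rw [List.mem_filter] at hp
  obtain ⟨hmem, hne⟩ := hp
  rw [List.mem_map] at hmem
  obtain ⟨q, hq, rfl⟩ := hmem
  have hsplit : (PySem.Str.split? raw ",").getD [] = (PySem.Chars.splitOn raw.toList [',']).map String.ofList := by
    simp [PySem.Str.split?, PySem.Chars.split?]
  rw [hsplit, List.mem_map] at hq
  obtain ⟨w, hw, rfl⟩ := hq
  have hnc : ',' ∉ w := splitOn_no_comma raw.toList ',' w hw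
  refine ⟨by simpa using hne, ?_, ?_⟩
  · show PySem.Str.strip (PySem.Str.strip (String.ofList w)) = PySem.Str.strip (String.ofList w)
    simp [PySem.Str.strip, String.toList_ofList, hs_strip_idem]
  · have hmem : ',' ∉ (PySem.Str.strip (String.ofList w)).toList := by
      simp only [PySem.Str.strip, String.toList_ofList]
      intro hx
      exact hnc (hs_mem_strip (by simpa [String.toList_ofList] using hx))
    rw [← Bool.not_eq_true, PySem.Str.isIn_iff_infix]
    intro hinf
    exact hmem (by simpa using (List.singleton_infix_iff _ _).mp (by simpa using hinf))

-- the seen-set dedup fold, with both components started equal, is PySem.Set.update / ofList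
def hsDstep : (List String × PySem.Set String) → String → (List String × PySem.Set String) :=
  fun acc s => if PySem.Set.contains acc.2 s then acc else (acc.1 ++ [s], PySem.Set.add acc.2 s)

theorem hs_dstep_pair (l : List String) : ∀ s : List String,
    l.foldl hsDstep (s, s) = (PySem.Set.update s l, PySem.Set.update s l) := by
  induction l with
  | nil => intro s; simp [PySem.Set.update]
  | cons a l ih =>
    intro s
    rw [List.foldl_cons, PySem.Set.update, List.foldl_cons, ← PySem.Set.update]
    have h : hsDstep (s, s) a = (PySem.Set.add s a, PySem.Set.add s a) := by
      by_cases hc : PySem.Set.contains s a = true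
      · simp only [hsDstep, PySem.Set.add, PySem.Set.contains]
        split_ifs <;> rfl
      · simp only [hsDstep, PySem.Set.add, PySem.Set.contains]
        split_ifs <;> rfl
    rw [h]
    exact ih _

theorem hs_dedupA_eq (out : List String) : hsDedupA out = PySem.Set.ofList out := by
  have h : hsDedupA out = (out.foldl hsDstep (([], []) : List String × PySem.Set String)).1 := rfl
  rw [h, hs_dstep_pair]
  rfl

-- set-fold absorption lemmas
theorem hs_add_mem {x : String} {s : PySem.Set String} (hx : x ∈ s) : PySem.Set.add s x = s := by
  simp [PySem.Set.add, PySem.Set.contains, hx]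

theorem hs_ofList_append (s t : List String) :
    PySem.Set.ofList (s ++ t) = PySem.Set.update (PySem.Set.ofList s) t := by
  simp [PySem.Set.ofList, PySem.Set.update, List.foldl_append]

theorem hs_ofList_skip {x : String} {s : List String} (hx : x ∈ s) (t : List String) :
    PySem.Set.ofList (s ++ x :: t) = PySem.Set.ofList (s ++ t) := by
  rw [hs_ofList_append, hs_ofList_append, PySem.Set.update, List.foldl_cons, ← PySem.Set.update,
    hs_add_mem (by rw [PySem.Set.mem_ofList]; exact hx)]

theorem hs_ofList_update (l : List String) : ∀ (s z : List String),
    PySem.Set.ofList (PySem.Set.update s l ++ z) = PySem.Set.ofList (s ++ (l ++ z)) := by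
  induction l with
  | nil => intro s z; simp [PySem.Set.update]
  | cons a l ih =>
    intro s z
    rw [PySem.Set.update, List.foldl_cons, ← PySem.Set.update]
    by_cases ha : a ∈ s
    · rw [hs_add_mem ha, ih]
      have h : s ++ (a :: l ++ z) = s ++ a :: (l ++ z) := by simp
      rw [h, hs_ofList_skip ha]
    · simp only [PySem.Set.add, PySem.Set.contains]
      rw [if_neg (by simpa using ha), ih]
      congr 1
      simp

theorem hs_foldl_ins (exp out : List String) : exp.foldl hsIns out = PySem.Set.update out exp := by
  rfl

theorem hs_contains_get? (raw : String) : sigMap.contains raw = (sigMap.get? raw).isSome := by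
  simp only [PySem.Dict.contains, PySem.Dict.get?, Option.isSome_map]
  exact Eq.symm List.isSome_find?

theorem hs_token_eq (out : List String) (raw : String) :
    hsTokenA out raw = out ++ [hsTranslate raw] := by
  unfold hsTokenA hsTranslate
  cases h : sigMap.get? raw with
  | some v =>
    rw [if_pos (by rw [hs_contains_get?, h]; rfl)]
    simp [PySem.Dict.getD, h]
  | none =>
    rw [if_neg (by rw [hs_contains_get?, h]; simp)]
    have h1 : PySem.Str.len "very high " = 10 := by decide
    have h2 : PySem.Str.len "high " = 5 := by decide
    have h3 : PySem.Str.len "very low " = 9 := by decide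
    have h4 : PySem.Str.len "low " = 4 := by decide
    simp only [hsPrefixes, hsPrefixLoop, h1, h2, h3, h4]
    split_ifs <;> rfl

-- the inner recursive call of A on a stripped, nonempty, comma-free part
theorem hs_inner_eq (p : String) (hne : p ≠ "") (hst : PySem.Str.strip p = p)
    (hnc : PySem.Str.isIn "," p = false) : humanizeA 1 [p] = [hsTranslate p] := by
  have hbeq : (p == "") = false := by simpa using hne
  show humanizeA (0+1) [p] = [hsTranslate p]
  rw [humanizeA]
  simp only [List.foldl_cons, List.foldl_nil, hbeq, if_false, hst, hnc, Bool.false_eq_true]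
  rw [hs_token_eq, hs_dedupA_eq]
  rfl

-- the per-string token list (B's phase 1, per element)
def hsFlat1 (s : String) : List String :=
  let raw := PySem.Str.strip (if s == "" then "" else s)
  if raw == "" then []
  else if PySem.Str.isIn "," raw then hsParts raw
  else [raw]

-- A's main loop at fuel 2 (inner calls at fuel 1)
def hsStepA : List String → String → List String := fun out s =>
  let raw := PySem.Str.strip (if s == "" then "" else s)
  if raw == "" then out
  else if PySem.Str.isIn "," raw then
    let expanded := (hsParts raw).foldl (fun e p => e ++ humanizeA 1 [p]) []
    expanded.foldl hsIns out
  else hsTokenA out raw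

theorem hs_main (signals : List String) : ∀ out : List String,
    PySem.Set.ofList (signals.foldl hsStepA out)
      = PySem.Set.ofList (out ++ signals.flatMap (fun s => (hsFlat1 s).map hsTranslate)) := by
  induction signals with
  | nil => intro out; simp
  | cons s rest ih =>
    intro out
    rw [List.foldl_cons, List.flatMap_cons, ih (hsStepA out s)]
    generalize (List.flatMap (fun s => (hsFlat1 s).map hsTranslate) rest) = z
    simp only [hsStepA, hsFlat1]
    by_cases hraw : (PySem.Str.strip (if s == "" then "" else s) == "") = true
    · rw [if_pos hraw, if_pos hraw]
      simp
    · rw [if_neg hraw, if_neg hraw]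
      by_cases hc : PySem.Str.isIn "," (PySem.Str.strip (if s == "" then "" else s)) = true
      · rw [if_pos hc, if_pos hc]
        have hexp : (hsParts (PySem.Str.strip (if s == "" then "" else s))).foldl
            (fun e p => e ++ humanizeA 1 [p]) []
            = (hsParts (PySem.Str.strip (if s == "" then "" else s))).map hsTranslate := by
          rw [PySem.List.foldl_congr_mem _ _ (fun e p => e ++ [hsTranslate p]) _ (by
            intro acc x hx
            obtain ⟨h1, h2, h3⟩ := hsParts_facts _ x hx
            rw [hs_inner_eq x h1 h2 h3])]
          rw [PySem.List.foldl_append_singleton_eq_map]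
          simp
        rw [hexp, hs_foldl_ins, hs_ofList_update]
      · rw [if_neg hc, if_neg hc, hs_token_eq]
        simp

theorem hs_alt_eq (signals : List String) :
    humanize_signals_alt signals
      = PySem.Set.ofList ((signals.flatMap hsFlat1).map hsTranslate) := by
  have htok : signals.foldl (fun tokens s =>
      let raw := PySem.Str.strip (if s == "" then "" else s)
      if raw == "" then tokens
      else if PySem.Str.isIn "," raw then
        tokens ++ (((PySem.Str.split? raw ",").getD []).map PySem.Str.strip).filter (fun p => !(p == ""))
      else tokens ++ [raw]) []
      = signals.flatMap hsFlat1 := by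
    rw [PySem.List.foldl_congr_mem _ _ (fun acc s => acc ++ hsFlat1 s) _ (by
      intro acc s _
      simp only [hsFlat1, hsParts]
      split_ifs <;> simp)]
    rw [PySem.List.foldl_append_eq_flatMap]
    simp
  have h : humanize_signals_alt signals
      = (((signals.flatMap hsFlat1).map hsTranslate).foldl hsDstep (([], []) : List String × PySem.Set String)).1 := by
    unfold humanize_signals_alt
    rw [htok, List.foldl_map]
    rfl
  rw [h, hs_dstep_pair]
  rfl

-- ===== VERDICT (by name: the statement is the Claim_ definition above) =====
theorem humanize_signals_spec : Claim_equal_humanize_signals := by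
  intro signals _
  show humanize_signals signals = humanize_signals_alt signals
  have hA : humanize_signals signals = hsDedupA (signals.foldl hsStepA []) := rfl
  rw [hA, hs_dedupA_eq, hs_main, hs_alt_eq, List.map_flatMap]
  simp
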